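-- pv_equiv track=rewrite | github.com/domo141/onetoomany | lossybindiff.py | mko2
-- ===== SOURCE A (Python) =====
-- class C:
--     red = '\033[38;5;1m'
--     res = '\033[m'
--     pass
--
-- def mko2(b1, b2):
--     bl1 = [ ]; al1 = [ ]
--     bl2 = [ ]; al2 = [ ]
--     c = 0
--     for i1, i2 in zip(b1, b2):
--         pre, post = ('', '') if i1 == i2 else (C.red, C.res)
--         bl1.append('%s%02X%s' % (pre, i1, post))
--         bl2.append('%s%02X%s' % (pre, i2, post))
--         al1.append('%s%s%s' % (pre, chr(i1) if i1>31 and i1<127 else '.', post))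
--         al2.append('%s%s%s' % (pre, chr(i2) if i2>31 and i2<127 else '.', post))
--         c += 1
--         pass
--     for c in range(c, 16):
--         if len(b1) > c:
--             i = b1[c]
--             s = '%s%02X%s' % (C.red, i, C.res)
--             a = '%s%s%s' % (C.red, chr(i) if i > 31 and i < 127 else '.', C.res)
--         else:
--             s = C.red + '--' + C.res if len(b2) > c else '--'
--             a = ' '
--             pass
--         bl1.append(s); al1.append(a)
--
--         if len(b2) > c:
--             i = b2[c]
--             s = '%s%02X%s' % (C.red, i, C.res)
--             a = '%s%s%s' % (C.red, chr(i) if i > 31 and i < 127 else '.', C.res)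
--         else:
--             s = C.red + '--' + C.res if len(b1) > c else '--'
--             a = ' '
--             pass
--         bl2.append(s); al2.append(a)
--         pass
--     bl1.insert(8, '')
--     bl2.insert(8, '')
--     al1.insert(8, '')
--     al2.insert(8, '')
--     return ' '.join(bl1), ''.join(al1), ' '.join(bl2), ''.join(al2)
-- ===== SOURCE B (Python) =====
-- RED = '\033[38;5;1m'
-- RES = '\033[m'
--
-- def _cell(i, mine, other, n):
--     # one display cell (hex, ascii) of row `mine`, the other row being `other`
--     if i < n:
--         v = mine[i]
--         pre, post = ('', '') if mine[i] == other[i] else (RED, RES)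
--         return pre + '%02X' % v + post, pre + (chr(v) if 31 < v < 127 else '.') + post
--     if i < len(mine):
--         v = mine[i]
--         return RED + '%02X' % v + RES, RED + (chr(v) if 31 < v < 127 else '.') + RES
--     return (RED + '--' + RES if i < len(other) else '--'), ' '
--
-- def _row(cells):
--     hx = [h for h, _ in cells]
--     asc = [a for _, a in cells]
--     hx = hx[:8] + [''] + hx[8:]
--     asc = asc[:8] + [''] + asc[8:]
--     return ' '.join(hx), ''.join(asc)
--
-- def mko2(b1, b2):
--     n = min(len(b1), len(b2))
--     m = max(n, 16)
--     h1, a1 = _row([_cell(i, b1, b2, n) for i in range(m)])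
--     h2, a2 = _row([_cell(i, b2, b1, n) for i in range(m)])
--     return h1, a1, h2, a2
-- ===== Notes on version B (the rewrite author's own statement) =====
-- stated objective: simpler
-- what changed: A's two accumulating loops (a zip loop over the common prefix followed by a range(c,16) padding loop, each appending to four parallel lists) are replaced by one shared per-position cell function mapped over range(max(n,16)), applied symmetrically to build each row, with the column-8 gap spliced in by slicing instead of list.insert.
import Mathlib
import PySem

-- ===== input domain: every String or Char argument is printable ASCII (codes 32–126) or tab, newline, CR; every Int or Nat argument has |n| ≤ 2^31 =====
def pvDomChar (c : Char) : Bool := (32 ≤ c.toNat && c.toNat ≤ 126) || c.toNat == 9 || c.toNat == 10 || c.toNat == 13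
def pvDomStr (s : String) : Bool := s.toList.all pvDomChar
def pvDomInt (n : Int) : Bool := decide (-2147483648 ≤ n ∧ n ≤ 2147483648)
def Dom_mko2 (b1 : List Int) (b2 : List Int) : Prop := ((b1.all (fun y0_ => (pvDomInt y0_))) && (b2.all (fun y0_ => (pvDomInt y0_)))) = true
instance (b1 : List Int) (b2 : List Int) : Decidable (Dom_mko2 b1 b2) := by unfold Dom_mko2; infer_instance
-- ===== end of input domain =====

-- B replaces A's two accumulating loops (zip prefix, then range(c,16) padding) by a single
-- shared per-position cell function mapped over range(max(n,16)) for each row symmetrically;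
-- objective: simpler. Return values only (neither program mutates its arguments).

-- shared formatting helpers (Python primitives: '%02X' % i, chr-or-dot, the color codes)
def pvRed : String := "\x1b[38;5;1m"
def pvRes : String := "\x1b[m"

def pvHexDigit (n : Nat) : Char := if n < 10 then Char.ofNat (48 + n) else Char.ofNat (55 + n)

-- uppercase hex digits of n (most significant first), exact for '%X' % n on Nat
def pvHexChars (n : Nat) : List Char :=
  if _h : n < 16 then [pvHexDigit n]
  else pvHexChars (n / 16) ++ [pvHexDigit (n % 16)]
  decreasing_by exact Nat.div_lt_self (by omega) (by omega)

-- '%02X' % i : zero-pad to width 2 (the sign counts toward the width, as in Python)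
def pvHex2 (i : Int) : String :=
  if i < 0 then "-" ++ String.ofList (pvHexChars (-i).toNat)
  else
    let ds := pvHexChars i.toNat
    String.ofList (if ds.length < 2 then '0' :: ds else ds)

-- chr(v) if 31 < v < 127 else '.'
def pvChrDot (v : Int) : String :=
  if 31 < v ∧ v < 127 then String.singleton (Char.ofNat v.toNat) else "."

-- ===== PORT A =====
-- one zip-loop iteration's (pre,post) pair and the four appended strings, row-1 values p.1
def aPre (p : Int × Int) : String × String := if p.1 == p.2 then ("", "") else (pvRed, pvRes)
def aZC1 (p : Int × Int) : String × String :=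
  ((aPre p).1 ++ pvHex2 p.1 ++ (aPre p).2, (aPre p).1 ++ pvChrDot p.1 ++ (aPre p).2)
def aZC2 (p : Int × Int) : String × String :=
  ((aPre p).1 ++ pvHex2 p.2 ++ (aPre p).2, (aPre p).1 ++ pvChrDot p.2 ++ (aPre p).2)

def aZipStep (st : List String × List String × List String × List String × Int) (p : Int × Int) :
    List String × List String × List String × List String × Int :=
  (st.1 ++ [(aZC1 p).1], st.2.1 ++ [(aZC1 p).2],
   st.2.2.1 ++ [(aZC2 p).1], st.2.2.2.1 ++ [(aZC2 p).2], st.2.2.2.2 + 1)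

-- one padding iteration's (s, a) for the row whose bytes are `mine` (the other row is `other`)
def aPad1 (mine other : List Int) (c : Int) : String × String :=
  if PySem.List.len mine > c then
    (pvRed ++ pvHex2 (PySem.List.pyGetD mine c 0) ++ pvRes,
     pvRed ++ pvChrDot (PySem.List.pyGetD mine c 0) ++ pvRes)
  else ((if PySem.List.len other > c then pvRed ++ "--" ++ pvRes else "--"), " ")

def aPadStep (b1 b2 : List Int) (st : List String × List String × List String × List String)
    (c : Int) : List String × List String × List String × List String :=
  (st.1 ++ [(aPad1 b1 b2 c).1], st.2.1 ++ [(aPad1 b1 b2 c).2],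
   st.2.2.1 ++ [(aPad1 b2 b1 c).1], st.2.2.2 ++ [(aPad1 b2 b1 c).2])

def mko2 (b1 : List Int) (b2 : List Int) : String × String × String × String :=
  let st := (b1.zip b2).foldl aZipStep ([], [], [], [], 0)
  let st2 := (PySem.List.pyRange st.2.2.2.2 16 1).foldl (aPadStep b1 b2)
      (st.1, st.2.1, st.2.2.1, st.2.2.2.1)
  let bl1 := PySem.List.insert st2.1 8 ""
  let al1 := PySem.List.insert st2.2.1 8 ""
  let bl2 := PySem.List.insert st2.2.2.1 8 ""
  let al2 := PySem.List.insert st2.2.2.2 8 ""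
  (PySem.Str.join " " bl1, PySem.Str.join "" al1, PySem.Str.join " " bl2, PySem.Str.join "" al2)

-- ===== PORT B =====
-- one display cell (hex, ascii) of row `mine` at position i; n = common prefix length
def bCell (i : Int) (mine other : List Int) (n : Int) : String × String :=
  if i < n then
    let v := PySem.List.pyGetD mine i 0
    let pp := if PySem.List.pyGetD mine i 0 == PySem.List.pyGetD other i 0 then ("", "")
              else (pvRed, pvRes)
    (pp.1 ++ pvHex2 v ++ pp.2, pp.1 ++ pvChrDot v ++ pp.2)
  else if i < PySem.List.len mine then
    let v := PySem.List.pyGetD mine i 0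
    (pvRed ++ pvHex2 v ++ pvRes, pvRed ++ pvChrDot v ++ pvRes)
  else ((if i < PySem.List.len other then pvRed ++ "--" ++ pvRes else "--"), " ")

def bRow (cells : List (String × String)) : String × String :=
  let hx := cells.map Prod.fst
  let asc := cells.map Prod.snd
  let hx2 := PySem.List.slice hx none (some 8) ++ [""] ++ PySem.List.slice hx (some 8) none
  let asc2 := PySem.List.slice asc none (some 8) ++ [""] ++ PySem.List.slice asc (some 8) none
  (PySem.Str.join " " hx2, PySem.Str.join "" asc2)

def mko2_alt (b1 : List Int) (b2 : List Int) : String × String × String × String :=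
  let n := min (PySem.List.len b1) (PySem.List.len b2)
  let m := max n 16
  let r1 := bRow ((PySem.List.pyRange 0 m 1).map (fun i => bCell i b1 b2 n))
  let r2 := bRow ((PySem.List.pyRange 0 m 1).map (fun i => bCell i b2 b1 n))
  (r1.1, r1.2, r2.1, r2.2)

-- ===== PRECONDITION & SPEC =====
def Spec_mko2 (b1 : List Int) (b2 : List Int) (out : String × String × String × String) : Prop := out = mko2_alt b1 b2
instance (b1 : List Int) (b2 : List Int) (out : String × String × String × String) : Decidable (Spec_mko2 b1 b2 out) := by unfold Spec_mko2; infer_instance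

-- ===== CLAIM (what is proved, stated in full; the proofs are below) =====
def Claim_equal_mko2 : Prop := ∀ (b1 : List Int) (b2 : List Int), Dom_mko2 b1 b2 → Spec_mko2 b1 b2 (mko2 b1 b2)

-- ===== LEMMAS AND PROOFS =====

theorem aZip_fold (zs : List (Int × Int)) (xs ys us vs : List String) (k : Int) :
    zs.foldl aZipStep (xs, ys, us, vs, k) =
      (xs ++ zs.map (fun p => (aZC1 p).1), ys ++ zs.map (fun p => (aZC1 p).2),
       us ++ zs.map (fun p => (aZC2 p).1), vs ++ zs.map (fun p => (aZC2 p).2),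
       k + zs.length) := by
  induction zs generalizing xs ys us vs k with
  | nil => simp
  | cons p t ih =>
    simp only [List.foldl_cons, aZipStep, ih, List.map_cons, List.length_cons]
    simp [List.append_assoc]
    omega

theorem aPad_fold (b1 b2 : List Int) (l : List Int) (xs ys us vs : List String) :
    l.foldl (aPadStep b1 b2) (xs, ys, us, vs) =
      (xs ++ l.map (fun c => (aPad1 b1 b2 c).1), ys ++ l.map (fun c => (aPad1 b1 b2 c).2),
       us ++ l.map (fun c => (aPad1 b2 b1 c).1), vs ++ l.map (fun c => (aPad1 b2 b1 c).2)) := by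
  induction l generalizing xs ys us vs with
  | nil => simp
  | cons c t ih =>
    simp only [List.foldl_cons, aPadStep, ih, List.map_cons]
    simp [List.append_assoc]

-- the zip-prefix cells of a row equal B's cells on range(n)
theorem zip_cells_eq (mine other : List Int) (nI : Int)
    (hn : nI = min (PySem.List.len mine) (PySem.List.len other)) :
    (mine.zip other).map aZC1 =
      (PySem.List.pyRange 0 nI 1).map (fun i => bCell i mine other nI) := by
  subst hn
  have hz : ((mine.zip other).length : Int) = min (PySem.List.len mine) (PySem.List.len other) := by
    simp [PySem.List.len_eq, List.length_zip]
  rw [← hz]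
  apply List.ext_getElem
  · simp [PySem.List.length_pyRange_one, List.length_zip]
    omega
  · intro k hk hk'
    have hkz : k < (mine.zip other).length := by simpa using hk
    have hk1 : k < mine.length := by simp [List.length_zip] at hkz; omega
    have hk2 : k < other.length := by simp [List.length_zip] at hkz; omega
    have hkc : (k : Int) < ((mine.zip other).length : Int) := by exact_mod_cast hkz
    simp only [List.getElem_map, PySem.List.getElem_pyRange_one, List.getElem_zip, zero_add]
    simp [bCell, aZC1, aPre, hk1, hk2]

-- the padding cells of a row equal B's cells on range(n, max(n,16))
theorem pad_cells_eq (mine other : List Int) (nI : Int)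
    (hn : nI = min (PySem.List.len mine) (PySem.List.len other)) :
    (PySem.List.pyRange nI 16 1).map (aPad1 mine other) =
      (PySem.List.pyRange nI (max nI 16) 1).map (fun i => bCell i mine other nI) := by
  by_cases h16 : 16 ≤ nI
  · rw [PySem.List.pyRange_one_eq_nil h16, max_eq_left h16, PySem.List.pyRange_one_eq_nil le_rfl]
    simp
  · rw [max_eq_right (le_of_not_ge h16)]
    apply List.map_congr_left
    intro i hi
    rw [PySem.List.mem_pyRange_one] at hi
    simp [bCell, aPad1, not_lt.mpr hi.1]
    rfl

-- whole row (before the column-8 gap): A's cells = B's cells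
theorem row_cells_eq (mine other : List Int) (nI : Int)
    (hn : nI = min (PySem.List.len mine) (PySem.List.len other)) :
    (mine.zip other).map aZC1 ++ (PySem.List.pyRange nI 16 1).map (aPad1 mine other) =
      (PySem.List.pyRange 0 (max nI 16) 1).map (fun i => bCell i mine other nI) := by
  have h0 : (0:Int) ≤ nI := by
    rw [hn]; simp [PySem.List.len_eq]
  rw [PySem.List.pyRange_one_append 0 nI (max nI 16) h0 (le_max_left _ _), List.map_append,
    ← zip_cells_eq mine other nI hn, ← pad_cells_eq mine other nI hn]


theorem zip_map_aZC2 (b1 b2 : List Int) :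
    (b1.zip b2).map aZC2 = (b2.zip b1).map aZC1 := by
  rw [← List.zip_swap b2 b1, List.map_map]
  apply List.map_congr_left
  intro p _
  have hbeq : (p.1 == p.2) = (p.2 == p.1) := by
    by_cases h : p.1 = p.2 <;> simp [h] <;> omega
  simp [aZC2, aZC1, aPre, Function.comp, hbeq]

theorem gap_insert (L : List String) (h8 : 8 ≤ L.length) :
    PySem.List.insert L 8 "" =
      PySem.List.slice L none (some 8) ++ [""] ++ PySem.List.slice L (some 8) none := by
  rw [PySem.List.insert_ofNat L 8 "" h8]
  simp [pysem]

-- ===== VERDICT (by name: the statement is the Claim_ definition above) =====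
theorem mko2_spec : Claim_equal_mko2 := by
  intro b1 b2 _
  show mko2 b1 b2 = mko2_alt b1 b2
  have hn : ((b1.zip b2).length : Int) = min (PySem.List.len b1) (PySem.List.len b2) := by
    simp [PySem.List.len_eq, List.length_zip]
  simp only [mko2, mko2_alt, bRow, aZip_fold, List.nil_append, zero_add, aPad_fold, hn]
  set nI := min (PySem.List.len b1) (PySem.List.len b2) with hnI
  have R1 := row_cells_eq b1 b2 nI hnI
  have R2 : (b1.zip b2).map aZC2 ++ (PySem.List.pyRange nI 16 1).map (aPad1 b2 b1)
      = (PySem.List.pyRange 0 (max nI 16) 1).map (fun i => bCell i b2 b1 nI) := by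
    rw [zip_map_aZC2]
    exact row_cells_eq b2 b1 nI (by rw [hnI, min_comm])
  have E1 := congrArg (List.map Prod.fst) R1
  have E2 := congrArg (List.map Prod.snd) R1
  have E3 := congrArg (List.map Prod.fst) R2
  have E4 := congrArg (List.map Prod.snd) R2
  simp only [List.map_append, List.map_map, Function.comp_def] at E1 E2 E3 E4
  have h8' : ∀ {α : Type} (f : Int → α), 8 ≤ ((PySem.List.pyRange 0 (max nI 16) 1).map f).length := by
    intro α f
    simp [PySem.List.length_pyRange_one]
  simp only [List.map_map, Function.comp_def]
  rw [E1, E2, E3, E4, gap_insert _ (h8' _), gap_insert _ (h8' _), gap_insert _ (h8' _),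
    gap_insert _ (h8' _)]
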